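-- pv_equiv track=rewrite | github.com/G0-4/CS112 | Assignments/PA 4/ProgrammingAssignment4.py | heater
-- ===== SOURCE A (Python) =====
-- def heater(fuel, temp): #Runs an if statement for if the temperature is less than 80, calculates the tradeoff of fuel for temperature, and returns the appropriate result.
--     result = ''
--     if temp < 80: #Skipped if temperature is not less than 80
--         while fuel > 0 and temp < 80: #Calculates using fuel for temperature
--             fuel -= 1
--             temp += 5
--     succ = 'success, ' + str(fuel) + ' leftover fuel!' #This string's used twice, so I just added it to a variable to make it easier.
--     if temp == 80 and fuel == 0:
--         result = 'success, no leftover fuel!'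
--     elif temp == 80 and fuel != 0 or temp > 80: #Was originally two lines with "temp > 80" being by itself. This lowers the number of lines while keeping the same results the same.
--         result = succ
--     elif temp <= 80:
--         result = 'failure, highest temp is ' + str(temp)
--     return result
-- ===== SOURCE B (Python) =====
-- def heater(fuel, temp):
--     # Closed form: the loop burns one fuel per +5 deg until temp >= 80 or fuel runs out.
--     if fuel > 0 and temp < 80:
--         steps = min(fuel, (80 - temp + 4) // 5)
--         fuel -= steps
--         temp += 5 * steps
--     if temp == 80 and fuel == 0:
--         return 'success, no leftover fuel!'
--     elif temp == 80 and fuel != 0 or temp > 80: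
--         return 'success, ' + str(fuel) + ' leftover fuel!'
--     elif temp <= 80:
--         return 'failure, highest temp is ' + str(temp)
--     return ''
-- ===== Notes on version B (the rewrite author's own statement) =====
-- stated objective: simpler
-- what changed: Replaced A's one-fuel-per-iteration while loop with a closed-form step count steps = min(fuel, ceil((80-temp)/5)) applied once; the status-string branches are unchanged.
import Mathlib
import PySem

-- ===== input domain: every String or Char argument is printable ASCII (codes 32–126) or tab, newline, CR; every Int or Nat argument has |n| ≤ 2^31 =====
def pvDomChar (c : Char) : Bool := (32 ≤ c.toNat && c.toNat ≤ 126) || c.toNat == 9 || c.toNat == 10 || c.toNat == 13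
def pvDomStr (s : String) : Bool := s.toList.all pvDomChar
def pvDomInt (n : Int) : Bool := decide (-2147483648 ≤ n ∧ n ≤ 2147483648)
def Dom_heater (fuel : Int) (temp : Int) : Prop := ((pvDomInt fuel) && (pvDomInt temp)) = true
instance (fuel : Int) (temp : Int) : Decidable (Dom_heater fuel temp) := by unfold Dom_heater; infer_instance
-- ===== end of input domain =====

-- B replaces A's one-fuel-per-iteration while loop by a closed-form step count (simpler; same return values).

-- ===== PORT A =====
-- the 'while fuel > 0 and temp < 80: fuel -= 1; temp += 5' loop of A
def heaterLoop (fuel : Int) (temp : Int) : Int × Int :=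
  if fuel > 0 ∧ temp < 80 then heaterLoop (fuel - 1) (temp + 5) else (fuel, temp)
termination_by (80 - temp).toNat
decreasing_by omega

def heater (fuel : Int) (temp : Int) : String :=
  let p := if temp < 80 then heaterLoop fuel temp else (fuel, temp)
  let fuel := p.1
  let temp := p.2
  let succ := "success, " ++ PySem.Int.toStr fuel ++ " leftover fuel!"
  if temp = 80 ∧ fuel = 0 then "success, no leftover fuel!"
  else if (temp = 80 ∧ fuel ≠ 0) ∨ temp > 80 then succ
  else if temp ≤ 80 then "failure, highest temp is " ++ PySem.Int.toStr temp
  else ""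

-- ===== PORT B =====
def heater_alt (fuel : Int) (temp : Int) : String :=
  let p := if fuel > 0 ∧ temp < 80 then
      let steps := min fuel (PySem.Int.floordiv (80 - temp + 4) 5)
      (fuel - steps, temp + 5 * steps)
    else (fuel, temp)
  let fuel := p.1
  let temp := p.2
  if temp = 80 ∧ fuel = 0 then "success, no leftover fuel!"
  else if (temp = 80 ∧ fuel ≠ 0) ∨ temp > 80 then "success, " ++ PySem.Int.toStr fuel ++ " leftover fuel!"
  else if temp ≤ 80 then "failure, highest temp is " ++ PySem.Int.toStr temp
  else ""

-- ===== PRECONDITION & SPEC =====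
def Spec_heater (fuel : Int) (temp : Int) (out : String) : Prop := out = heater_alt fuel temp
instance (fuel : Int) (temp : Int) (out : String) : Decidable (Spec_heater fuel temp out) := by unfold Spec_heater; infer_instance

-- ===== CLAIM (what is proved, stated in full; the proofs are below) =====
def Claim_equal_heater : Prop := ∀ (fuel : Int) (temp : Int), Dom_heater fuel temp → Spec_heater fuel temp (heater fuel temp)

-- ===== LEMMAS AND PROOFS =====
theorem heaterLoop_closed (fuel temp : Int) :
    heaterLoop fuel temp =
      if fuel > 0 ∧ temp < 80 then
        (fuel - min fuel (PySem.Int.floordiv (80 - temp + 4) 5),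
         temp + 5 * min fuel (PySem.Int.floordiv (80 - temp + 4) 5))
      else (fuel, temp) := by
  fun_induction heaterLoop fuel temp with
  | case1 fuel temp h ih =>
    rw [ih]
    rw [PySem.Int.floordiv_eq_ediv_of_pos (a := 80 - temp + 4) (by omega),
        PySem.Int.floordiv_eq_ediv_of_pos (a := 80 - (temp + 5) + 4) (by omega)] at *
    split_ifs with h2
    · simp only [Prod.mk.injEq]
      constructor <;> omega
    · simp only [Prod.mk.injEq]
      constructor <;> omega
  | case2 fuel temp h =>
    rw [if_neg h]

-- ===== VERDICT (by name: the statement is the Claim_ definition above) =====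
theorem heater_spec : Claim_equal_heater := by
  intro fuel temp _
  unfold Spec_heater heater heater_alt
  rw [heaterLoop_closed]
  by_cases h1 : temp < 80 <;> by_cases h2 : fuel > 0 <;> simp [h1, h2]
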